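-- pv_equiv track=rewrite | github.com/jackey-qiu/DaFy | EnginePool/models/domain_creator.py | create_sorbate_ids2
-- ===== SOURCE A (Python) =====
-- def create_sorbate_ids2(el=['Pb','Sb'],N=[1,1],tag='_D1A'):
--     id_list=[]
--     for i in range(len(N)):
--         for j in range(N[i]):
--             if i!=0:
--                 sum_front=sum(N[0:i])
--                 id_list.append(el[i]+str(j+1+sum_front)+tag)
--             else:
--                 id_list.append(el[i]+str(j+1)+tag)
--     return id_list
-- ===== SOURCE B (Python) =====
-- def create_sorbate_ids2(el=['Pb','Sb'], N=[1,1], tag='_D1A'):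
--     offsets, s = [], 0
--     for n in N:
--         offsets.append(s)
--         s += n
--     return [el[i] + str(off + j + 1) + tag
--             for i, off in enumerate(offsets)
--             for j in range(N[i])]
-- ===== Notes on version B (the rewrite author's own statement) =====
-- stated objective: simpler
-- what changed: Precomputes the running prefix sums of N once in a single pass into an offsets list, then emits all ids in one flat comprehension over enumerate(offsets), removing the i!=0 branch and the O(len(N)*sum(N)) re-scan of sum(N[0:i]) inside the inner loop.
import Mathlib
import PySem

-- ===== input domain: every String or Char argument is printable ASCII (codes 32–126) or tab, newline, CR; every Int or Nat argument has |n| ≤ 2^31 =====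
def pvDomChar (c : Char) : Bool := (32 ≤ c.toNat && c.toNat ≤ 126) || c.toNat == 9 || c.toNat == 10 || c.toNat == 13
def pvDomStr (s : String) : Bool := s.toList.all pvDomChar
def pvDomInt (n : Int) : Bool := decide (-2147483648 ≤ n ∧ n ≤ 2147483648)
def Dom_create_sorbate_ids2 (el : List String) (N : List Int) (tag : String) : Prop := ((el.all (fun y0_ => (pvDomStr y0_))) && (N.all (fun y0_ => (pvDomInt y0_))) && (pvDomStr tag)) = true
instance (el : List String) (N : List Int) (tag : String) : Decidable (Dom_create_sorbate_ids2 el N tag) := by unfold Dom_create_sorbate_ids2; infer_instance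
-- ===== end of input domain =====

-- B precomputes the prefix sums of N in one pass and emits the ids in a single flat comprehension,
-- replacing A's per-item re-scan of sum(N[0:i]) and its i!=0 branch (objective: simpler).


-- ===== PORT A =====
-- Literal transliteration of A; el[i] is ported with pyGetD (the IndexError inputs are excluded by Pre_).
def create_sorbate_ids2 (el : List String) (N : List Int) (tag : String) : List String :=
  (PySem.List.pyRange 0 (N.length : Int) 1).foldl (fun id_list i =>
    (PySem.List.pyRange 0 (PySem.List.pyGetD N i 0) 1).foldl (fun id_list j =>
      if i ≠ 0 then
        let sum_front := (PySem.List.slice N (some 0) (some i)).sum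
        id_list ++ [PySem.List.pyGetD el i "" ++ PySem.Int.toStr (j + 1 + sum_front) ++ tag]
      else
        id_list ++ [PySem.List.pyGetD el i "" ++ PySem.Int.toStr (j + 1) ++ tag]) id_list) []

-- ===== PORT B =====
-- B: one pass building the prefix-sum offsets, then one flat comprehension over enumerate(offsets).
def create_sorbate_ids2_alt (el : List String) (N : List Int) (tag : String) : List String :=
  let offsets := (N.foldl (fun (p : List Int × Int) n => (p.1 ++ [p.2], p.2 + n)) ([], 0)).1
  (PySem.List.enumerate offsets 0).flatMap (fun p =>
    (PySem.List.pyRange 0 (PySem.List.pyGetD N p.1 0) 1).map (fun j =>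
      PySem.List.pyGetD el p.1 "" ++ PySem.Int.toStr (p.2 + j + 1) ++ tag))

-- ===== PRECONDITION & SPEC =====
-- Pre_ excludes exactly the inputs where Python A raises IndexError: an index k with a positive
-- count N[k] but no element el[k] to name.
def Pre_create_sorbate_ids2 (el : List String) (N : List Int) (tag : String) : Prop :=
  ∀ k : Nat, k < N.length → 0 < N.getD k 0 → k < el.length
instance (el : List String) (N : List Int) (tag : String) : Decidable (Pre_create_sorbate_ids2 el N tag) := by unfold Pre_create_sorbate_ids2; infer_instance
def pvWitness_create_sorbate_ids2 : List String × List Int × String := (["Pb", "Sb"], [1, 1], "_D1A")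
def Spec_create_sorbate_ids2 (el : List String) (N : List Int) (tag : String) (out : List String) : Prop := out = create_sorbate_ids2_alt el N tag
instance (el : List String) (N : List Int) (tag : String) (out : List String) : Decidable (Spec_create_sorbate_ids2 el N tag out) := by unfold Spec_create_sorbate_ids2; infer_instance

-- ===== CLAIM (what is proved, stated in full; the proofs are below) =====
def Claim_equal_create_sorbate_ids2 : Prop := ∀ (el : List String) (N : List Int) (tag : String), Dom_create_sorbate_ids2 el N tag → Pre_create_sorbate_ids2 el N tag → Spec_create_sorbate_ids2 el N tag (create_sorbate_ids2 el N tag)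

-- ===== LEMMAS AND PROOFS =====

theorem offsets_fold (N : List Int) (acc : List Int) (s : Int) :
    (N.foldl (fun (p : List Int × Int) n => (p.1 ++ [p.2], p.2 + n)) (acc, s)).1
      = acc ++ (List.range N.length).map (fun k => s + (N.take k).sum) := by
  induction N generalizing acc s with
  | nil => simp
  | cons n N ih =>
    simp only [List.foldl_cons, ih, List.length_cons, List.range_succ_eq_map, List.map_cons,
      List.map_map]
    simp [Function.comp_def, List.append_assoc]
    intro k _
    ring

theorem flatMap_congr_mem {α β : Type} (l : List α) (f g : α → List β)
    (h : ∀ a ∈ l, f a = g a) : l.flatMap f = l.flatMap g := by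
  induction l with
  | nil => rfl
  | cons x xs ih =>
    simp only [List.flatMap_cons, h x (List.mem_cons_self), ih fun a ha => h a (List.mem_cons_of_mem _ ha)]

theorem ports_agree (el : List String) (N : List Int) (tag : String) :
    create_sorbate_ids2 el N tag = create_sorbate_ids2_alt el N tag := by
  unfold create_sorbate_ids2
  simp only [create_sorbate_ids2_alt]
  -- A: collapse the inner loop (the i = 0 branch is the i ≠ 0 branch with an empty prefix sum)
  have hfun : (fun (id_list : List String) (i : Int) =>
      (PySem.List.pyRange 0 (PySem.List.pyGetD N i 0) 1).foldl (fun id_list j =>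
        if i ≠ 0 then
          let sum_front := (PySem.List.slice N (some 0) (some i)).sum
          id_list ++ [PySem.List.pyGetD el i "" ++ PySem.Int.toStr (j + 1 + sum_front) ++ tag]
        else
          id_list ++ [PySem.List.pyGetD el i "" ++ PySem.Int.toStr (j + 1) ++ tag]) id_list)
      = fun (id_list : List String) (i : Int) => id_list ++
        (PySem.List.pyRange 0 (PySem.List.pyGetD N i 0) 1).map (fun j =>
          PySem.List.pyGetD el i "" ++
            PySem.Int.toStr (j + 1 + (PySem.List.slice N (some 0) (some i)).sum) ++ tag) := by
    funext id_list i
    by_cases hi : i = 0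
    · subst hi
      simp only [ne_eq, not_true_eq_false, if_false,
        PySem.List.foldl_append_singleton_eq_map]
      simp [PySem.List.slice_zero_start]
      intro a _ _
      rw [PySem.List.slice_to _ le_rfl]
      norm_num
    · simp only [ne_eq, hi, not_false_eq_true, if_true,
        PySem.List.foldl_append_singleton_eq_map]
  rw [hfun, PySem.List.foldl_append_eq_flatMap, List.nil_append]
  -- B: the offsets list is the list of prefix sums of N
  rw [offsets_fold, List.nil_append]
  have hoff : (List.range N.length).map (fun k => (0 : Int) + (N.take k).sum)
      = (List.range N.length).map (fun k => (N.take k).sum) := by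
    simp
  rw [hoff, PySem.List.enumerate_eq_map_pyRange (d := 0)]
  simp only [PySem.List.len_eq, List.length_map, List.length_range, List.flatMap_map]
  apply flatMap_congr_mem
  intro i hi
  obtain ⟨h0, hlt⟩ := (PySem.List.mem_pyRange_one).1 hi
  have hofflen : i < ((List.range N.length).map (fun k => ((N.take k).sum : Int))).length := by
    simpa using hlt
  have hget : PySem.List.pyGetD ((List.range N.length).map (fun k => ((N.take k).sum : Int))) i 0
      = (N.take i.toNat).sum := by
    rw [PySem.List.pyGetD_eq_getElem _ _ h0 (by simpa using hlt)]
    simp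
  have hslice : (PySem.List.slice N (some 0) (some i)).sum = (N.take i.toNat).sum := by
    rw [PySem.List.slice_zero_start, PySem.List.slice_to _ h0]
  rw [hget, hslice]
  apply List.map_congr_left
  intro j _
  have harg : j + 1 + (N.take i.toNat).sum = (N.take i.toNat).sum + j + 1 := by ring
  rw [harg]

-- ===== VERDICT (by name: the statement is the Claim_ definition above) =====
theorem create_sorbate_ids2_spec : Claim_equal_create_sorbate_ids2 := by
  intro el N tag _ _
  exact ports_agree el N tag
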